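-- pv_equiv track=rewrite | github.com/tengr/Algorithms | qq.py | sequence_gen
-- ===== SOURCE A (Python) =====
-- def sequence_gen(char_map, pattern):
--     res_list = []
--     arr = [ch for ch in pattern]
--     offset1 = 0
--     seq1 = set()
--     while chr(ord('A') + offset1) in char_map:
--         seq1.add(chr(ord('A') + offset1))
--         offset1 += 1
--     offset1 = 10 - offset1
--     while offset1 >= 0:
--         arr1 = [str(offset1 + ord(ch) - ord('A')) if ch in seq1 else ch for ch in arr]
--         if 'X' in char_map:
--             offset2 = 0
--             seq2 = set()
--             while chr(ord('X') + offset2) in char_map: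
--                 seq2.add(chr(ord('X') + offset2))
--                 offset2 += 1
--             offset2 = 10 - offset2
--             while offset2 >= 0:
--                 arr2 = [str(offset2 + ord(ch) - ord('X')) if ch in seq2 else ch for ch in arr1]
--                 res_list.append(arr2)
--                 offset2 -= 1
--         else:
--             res_list.append(arr1)
--         offset1 -= 1
--     return res_list
-- ===== SOURCE B (Python) =====
-- def sequence_gen(char_map, pattern):
--     codes = {ord(k) for k in char_map if len(k) == 1}
--
--     def run(b):
--         # length of the consecutive code run starting at b: first gap above b
--         return next(n for n in range(130) if b + n not in codes)
--
--     groups = [(ord('A'), run(ord('A')))]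
--     if ord('X') in codes:
--         groups.append((ord('X'), run(ord('X'))))
--
--     # tokenize the pattern once: (group index, delta) for substitutable chars,
--     # (-1, ch) for literals
--     tokens = []
--     for ch in pattern:
--         for gi, (b, cnt) in enumerate(groups):
--             if 0 <= ord(ch) - b < cnt:
--                 tokens.append((gi, ord(ch) - b))
--                 break
--         else:
--             tokens.append((-1, ch))
--
--     # recursive cartesian product over the groups, resolving one group per level
--     def emit(gi, toks):
--         if gi == len(groups):
--             return [[t for (_, t) in toks]]
--         cnt = groups[gi][1]
--         rows = []
--         for off in range(10 - cnt, -1, -1):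
--             rows.extend(emit(gi + 1,
--                              [(-1, str(off + t)) if g == gi else (g, t)
--                               for (g, t) in toks]))
--         return rows
--
--     return emit(0, tokens)
-- ===== Notes on version B (the rewrite author's own statement) =====
-- stated objective: alternative
-- what changed: A runs nested mutable while-loops that rebuild key-membership sets and re-substitute the whole array on every iteration; B builds one integer code set, finds each group's run length as a first-gap search, tokenizes the pattern once into (group, delta)/literal tokens, and emits rows by a recursive cartesian product that resolves one group per level.
import Mathlib
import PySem

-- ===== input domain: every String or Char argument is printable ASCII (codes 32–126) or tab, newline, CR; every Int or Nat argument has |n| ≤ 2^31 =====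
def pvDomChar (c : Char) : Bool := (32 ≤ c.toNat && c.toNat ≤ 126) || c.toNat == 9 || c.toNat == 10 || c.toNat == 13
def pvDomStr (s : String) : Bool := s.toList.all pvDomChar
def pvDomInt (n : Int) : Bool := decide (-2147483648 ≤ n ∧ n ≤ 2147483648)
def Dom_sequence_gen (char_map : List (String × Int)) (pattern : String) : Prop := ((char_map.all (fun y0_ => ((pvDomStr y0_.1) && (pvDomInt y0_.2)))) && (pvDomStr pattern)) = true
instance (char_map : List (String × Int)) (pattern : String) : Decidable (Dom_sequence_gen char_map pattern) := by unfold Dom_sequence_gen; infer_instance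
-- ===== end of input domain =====

-- B replaces A's nested mutable while-loops (which rebuild membership sets and re-substitute
-- whole arrays) by: one integer code set, first-gap searches for the run lengths, a one-pass
-- tokenization of the pattern, and a recursive cartesian product resolving one group per level
-- (objective: alternative algorithm, same cost).

-- shared primitives: Python's chr / ord (ord only applied to 1-char strings, as in both Pythons) / dict key membership
def pvChr (n : Int) : String := String.ofList [Char.ofNat n.toNat]
def pvOrd (s : String) : Int := ((s.toList.headD 'A').toNat : Int)
def pvHasKey (cm : List (String × Int)) (k : String) : Bool := cm.any (fun p => p.1 == k)

-- ===== PORT A =====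
-- the 'while chr(ord(base)+offset) in char_map' loops; fuel cm.length+131 is never exhausted:
-- each successful test consumes a distinct key of cm, so at most cm.length iterations happen
def seqLoopA (cm : List (String × Int)) (base : Int) : Nat → Int → PySem.Set String → Int × PySem.Set String
  | 0, off, seq => (off, seq)
  | fuel + 1, off, seq =>
      if pvHasKey cm (pvChr (base + off)) then
        seqLoopA cm base fuel (off + 1) (PySem.Set.add seq (pvChr (base + off)))
      else (off, seq)

-- the comprehension '[str(offset + ord(ch) - ord(base)) if ch in seq else ch for ch in arr]'
def applyA (seq : PySem.Set String) (base : Int) (off : Int) (arr : List String) : List String :=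
  arr.map (fun ch => if ch ∈ seq then PySem.Int.toStr (off + pvOrd ch - base) else ch)

-- inner 'while offset2 >= 0' loop
def loop2A (seq2 : PySem.Set String) (arr1 : List String) (off2 : Int) : List (List String) :=
  if 0 ≤ off2 then applyA seq2 88 off2 arr1 :: loop2A seq2 arr1 (off2 - 1) else []
termination_by (off2 + 1).toNat
decreasing_by omega

-- outer 'while offset1 >= 0' loop (the X-group set is recomputed each iteration, as in A)
def loop1A (cm : List (String × Int)) (arr : List String) (seq1 : PySem.Set String) (off1 : Int) : List (List String) :=
  if 0 ≤ off1 then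
    (let arr1 := applyA seq1 65 off1 arr
     if pvHasKey cm "X" then
       let r := seqLoopA cm 88 (cm.length + 131) 0 []
       loop2A r.2 arr1 (10 - r.1)
     else [arr1]) ++ loop1A cm arr seq1 (off1 - 1)
  else []
termination_by (off1 + 1).toNat
decreasing_by omega

def sequence_gen (char_map : List (String × Int)) (pattern : String) : List (List String) :=
  let arr := pattern.toList.map (fun c => String.ofList [c])
  let r := seqLoopA char_map 65 (char_map.length + 131) 0 []
  loop1A char_map arr r.2 (10 - r.1)

-- ===== PORT B =====
-- a token of the tokenized pattern: (gi, delta) for a substitutable char, (-1, ch) literal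
inductive PvTok
  | grp : Int → Int → PvTok
  | lit : String → PvTok
deriving DecidableEq, Repr

-- 'codes = {ord(k) for k in char_map if len(k) == 1}'
def pvCodes (cm : List (String × Int)) : PySem.Set Int :=
  PySem.Set.ofList (cm.filterMap (fun p => if p.1.toList.length = 1 then some (pvOrd p.1) else none))

-- 'next(n for n in range(130) if b + n not in codes)'; 0 on exhaustion (unreachable: a gap
-- always exists below 130 on the stated domain, where Python's next would otherwise raise)
def pvFirstGap (codes : PySem.Set Int) (b : Int) : List Int → Int
  | [] => 0
  | n :: rest => if (b + n) ∈ codes then pvFirstGap codes b rest else n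

def pvRun (codes : PySem.Set Int) (b : Int) : Int :=
  pvFirstGap codes b (PySem.List.pyRange 0 130 1)

-- the tokenizer's inner 'for gi, (b, cnt) in enumerate(groups): … break / else' over one char
def pvClassify (gi : Int) (groups : List (Int × Int)) (ch : String) : PvTok :=
  match groups with
  | [] => .lit ch
  | (b, cnt) :: rest =>
      if 0 ≤ pvOrd ch - b ∧ pvOrd ch - b < cnt then .grp gi (pvOrd ch - b)
      else pvClassify (gi + 1) rest ch

-- the base case's '[t for (_, t) in toks]' (a group token never survives to the base case)
def pvTokStr : PvTok → String
  | .lit s => s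
  | .grp _ d => PySem.Int.toStr d

-- '[(-1, str(off + t)) if g == gi else (g, t) for (g, t) in toks]'
def pvSubst (gi : Int) (off : Int) : PvTok → PvTok
  | .grp g d => if g == gi then .lit (PySem.Int.toStr (off + d)) else .grp g d
  | .lit s => .lit s

-- 'emit(gi, toks)': recursion over the still-unresolved suffix of groups; gi tracks the level
def pvEmit (gi : Int) (groups : List (Int × Int)) (toks : List PvTok) : List (List String) :=
  match groups with
  | [] => [toks.map pvTokStr]
  | (_, cnt) :: rest =>
      (PySem.List.pyRange (10 - cnt) (-1) (-1)).foldl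
        (fun rows off => rows ++ pvEmit (gi + 1) rest (toks.map (pvSubst gi off))) []

def sequence_gen_alt (char_map : List (String × Int)) (pattern : String) : List (List String) :=
  let codes := pvCodes char_map
  let groups := if (88 : Int) ∈ codes
    then [((65 : Int), pvRun codes 65), ((88 : Int), pvRun codes 88)]
    else [((65 : Int), pvRun codes 65)]
  let toks := pattern.toList.map (fun c => pvClassify 0 groups (String.ofList [c]))
  pvEmit 0 groups toks

-- ===== PRECONDITION & SPEC =====
def Spec_sequence_gen (char_map : List (String × Int)) (pattern : String) (out : List (List String)) : Prop := out = sequence_gen_alt char_map pattern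
instance (char_map : List (String × Int)) (pattern : String) (out : List (List String)) : Decidable (Spec_sequence_gen char_map pattern out) := by unfold Spec_sequence_gen; infer_instance

-- ===== CLAIM (what is proved, stated in full; the proofs are below) =====
def Claim_equal_sequence_gen : Prop := ∀ (char_map : List (String × Int)) (pattern : String), Dom_sequence_gen char_map pattern → Spec_sequence_gen char_map pattern (sequence_gen char_map pattern)

-- ===== LEMMAS AND PROOFS =====

-- proof-side abbreviation for the first component of A's key-run loop
def countB (cm : List (String × Int)) (base : Int) : Nat → Int → Int
  | 0, n => n
  | fuel + 1, n =>
      if pvHasKey cm (pvChr (base + n)) then countB cm base fuel (n + 1) else n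

theorem seqLoopA_fst (cm : List (String × Int)) (base : Int) :
    ∀ (fuel : Nat) (off : Int) (seq : PySem.Set String),
      (seqLoopA cm base fuel off seq).1 = countB cm base fuel off := by
  intro fuel
  induction fuel with
  | zero => intro off seq; rfl
  | succ n ih =>
      intro off seq
      simp only [seqLoopA, countB]
      split <;> simp [ih]

theorem countB_ge (cm : List (String × Int)) (base : Int) :
    ∀ (fuel : Nat) (off : Int), off ≤ countB cm base fuel off := by
  intro fuel
  induction fuel with
  | zero => intro off; simp [countB]
  | succ n ih =>
      intro off
      simp only [countB]
      split
      · exact le_trans (by omega) (ih (off + 1))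
      · exact le_refl _

theorem countB_run (cm : List (String × Int)) (base : Int) :
    ∀ (fuel : Nat) (off i : Int), off ≤ i → i < countB cm base fuel off →
      pvHasKey cm (pvChr (base + i)) = true := by
  intro fuel
  induction fuel with
  | zero => intro off i h1 h2; simp [countB] at h2; omega
  | succ n ih =>
      intro off i h1 h2
      simp only [countB] at h2
      by_cases h : pvHasKey cm (pvChr (base + off)) = true
      · rw [if_pos h] at h2
        by_cases hio : i = off
        · subst hio; exact h
        · exact ih (off + 1) i (by omega) h2
      · rw [if_neg h] at h2; omega

theorem seqLoopA_mem (cm : List (String × Int)) (base : Int) :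
    ∀ (fuel : Nat) (off : Int) (seq : PySem.Set String) (s : String),
      s ∈ (seqLoopA cm base fuel off seq).2 ↔
        s ∈ seq ∨ ∃ i : Int, off ≤ i ∧ i < countB cm base fuel off ∧ s = pvChr (base + i) := by
  intro fuel
  induction fuel with
  | zero =>
      intro off seq s
      simp only [seqLoopA, countB]
      constructor
      · exact Or.inl
      · rintro (h | ⟨i, h1, h2, _⟩)
        · exact h
        · omega
  | succ n ih =>
      intro off seq s
      simp only [seqLoopA, countB]
      by_cases h : pvHasKey cm (pvChr (base + off)) = true
      · rw [if_pos h, if_pos h, ih (off + 1) (PySem.Set.add seq (pvChr (base + off))) s,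
          PySem.Set.mem_add]
        have hge := countB_ge cm base n (off + 1)
        constructor
        · rintro ((hs | rfl) | ⟨i, h1, h2, rfl⟩)
          · exact Or.inl hs
          · exact Or.inr ⟨off, le_refl _, by omega, rfl⟩
          · exact Or.inr ⟨i, by omega, h2, rfl⟩
        · rintro (hs | ⟨i, h1, h2, rfl⟩)
          · exact Or.inl (Or.inl hs)
          · by_cases hio : i = off
            · subst hio; exact Or.inl (Or.inr rfl)
            · exact Or.inr ⟨i, by omega, h2, rfl⟩
      · rw [if_neg h, if_neg h]
        constructor
        · exact Or.inl
        · rintro (hs | ⟨i, h1, h2, _⟩)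
          · exact hs
          · omega

theorem pvOrd_pvChr (n : Int) (h0 : 0 ≤ n) (h1 : n ≤ 126) : pvOrd (pvChr n) = n := by
  simp only [pvChr, pvOrd, String.toList_ofList, List.headD_cons]
  rw [Char.toNat_ofNat, if_pos (Or.inl (by omega : n.toNat < 0xd800))]
  omega

theorem toList_pvChr (n : Int) : (pvChr n).toList = [Char.ofNat n.toNat] := by
  simp [pvChr, String.toList_ofList]

theorem pvOrd_le_of_dom (s : String) (h : pvDomStr s = true) : pvOrd s ≤ 126 := by
  rw [pvDomStr, List.all_eq_true] at h
  rw [pvOrd]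
  cases hs : s.toList with
  | nil => simp
  | cons c rest =>
      have := h c (by rw [hs]; exact List.mem_cons_self)
      simp only [pvDomChar, Bool.or_eq_true, Bool.and_eq_true, decide_eq_true_eq, beq_iff_eq,
        Nat.le_iff_lt_or_eq] at this
      simp only [List.headD_cons]
      omega

theorem hasKey_pvChr_big (cm : List (String × Int))
    (hK : ∀ p ∈ cm, pvDomStr p.1 = true) (n : Int) (h : 127 ≤ n) :
    pvHasKey cm (pvChr n) = false := by
  by_contra hc
  rw [Bool.not_eq_false, pvHasKey, List.any_eq_true] at hc
  obtain ⟨p, hp, hbeq⟩ := hc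
  have hkey : p.1 = pvChr n := by simpa using hbeq
  have hdom := hK p hp
  rw [pvDomStr, List.all_eq_true] at hdom
  rw [hkey, toList_pvChr] at hdom
  have hch := hdom (Char.ofNat n.toNat) (List.mem_singleton.mpr rfl)
  simp only [pvDomChar, Bool.or_eq_true, Bool.and_eq_true, decide_eq_true_eq, beq_iff_eq] at hch
  rw [Char.toNat_ofNat] at hch
  by_cases hv : n.toNat.isValidChar
  · rw [if_pos hv] at hch; omega
  · rw [if_neg hv] at hch; omega

theorem countB_le127 (cm : List (String × Int))
    (hK : ∀ p ∈ cm, pvDomStr p.1 = true) (base : Int) :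
    ∀ (fuel : Nat) (off : Int), 0 ≤ off → base + off ≤ 127 →
      base + countB cm base fuel off ≤ 127 := by
  intro fuel
  induction fuel with
  | zero => intro off h0 h1; simpa [countB] using h1
  | succ n ih =>
      intro off h0 h1
      simp only [countB]
      by_cases h : pvHasKey cm (pvChr (base + off)) = true
      · rw [if_pos h]
        have hne : base + off ≠ 127 := by
          intro e
          rw [hasKey_pvChr_big cm hK (base + off) (by omega)] at h
          exact absurd h (by simp)
        exact ih (off + 1) (by omega) (by omega)
      · rw [if_neg h]; exact h1

theorem countB_stop (cm : List (String × Int))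
    (hK : ∀ p ∈ cm, pvDomStr p.1 = true) (base : Int) :
    ∀ (fuel : Nat) (off : Int), 0 ≤ off → 128 ≤ base + off + fuel →
      pvHasKey cm (pvChr (base + countB cm base fuel off)) = false := by
  intro fuel
  induction fuel with
  | zero =>
      intro off h0 hbig
      simp only [countB]
      exact hasKey_pvChr_big cm hK _ (by omega)
  | succ n ih =>
      intro off h0 hbig
      simp only [countB]
      by_cases h : pvHasKey cm (pvChr (base + off)) = true
      · rw [if_pos h]
        exact ih (off + 1) (by omega) (by push_cast at hbig ⊢; omega)
      · rw [if_neg h]; simpa using h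

theorem mem_seqLoop_char (cm : List (String × Int)) (base : Int) (fuel : Nat)
    (hb : 65 ≤ base) (hc : base + countB cm base fuel 0 ≤ 127) (s : String) :
    s ∈ (seqLoopA cm base fuel 0 []).2 ↔
      (s.toList.length = 1 ∧ base ≤ pvOrd s ∧ pvOrd s < base + countB cm base fuel 0) := by
  rw [seqLoopA_mem cm base fuel 0 [] s]
  have hge : (0 : Int) ≤ countB cm base fuel 0 := countB_ge cm base fuel 0
  constructor
  · rintro (hs | ⟨i, h1, h2, rfl⟩)
    · simp at hs
    · have h0 : 0 ≤ base + i := by omega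
      have h126 : base + i ≤ 126 := by omega
      refine ⟨by rw [toList_pvChr]; rfl, ?_, ?_⟩ <;> rw [pvOrd_pvChr _ h0 h126] <;> omega
  · rintro ⟨hl, h1, h2⟩
    obtain ⟨c, hc'⟩ := List.length_eq_one_iff.mp hl
    have hs : s = String.ofList [c] := by rw [← hc', String.ofList_toList]
    have hord : pvOrd s = (c.toNat : Int) := by simp [pvOrd, hc']
    refine Or.inr ⟨(c.toNat : Int) - base, by omega, by omega, ?_⟩
    have : base + ((c.toNat : Int) - base) = (c.toNat : Int) := by ring
    rw [this, pvChr, Int.toNat_natCast, Char.ofNat_toNat, hs]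

theorem mem_pvCodes (cm : List (String × Int))
    (hK : ∀ p ∈ cm, pvDomStr p.1 = true) (m : Int) (h0 : 0 ≤ m) :
    (m ∈ pvCodes cm) ↔ pvHasKey cm (pvChr m) = true := by
  rw [pvCodes, PySem.Set.mem_ofList, List.mem_filterMap, pvHasKey, List.any_eq_true]
  by_cases h126 : m ≤ 126
  · constructor
    · rintro ⟨p, hp, hsome⟩
      split at hsome
      · rename_i hlen
        obtain ⟨c, hc⟩ := List.length_eq_one_iff.mp hlen
        have hps : p.1 = String.ofList [c] := by rw [← hc, String.ofList_toList]
        have hord : pvOrd p.1 = (c.toNat : Int) := by simp [pvOrd, hc]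
        have hm : m = (c.toNat : Int) := by
          have := Option.some.inj hsome; omega
        refine ⟨p, hp, ?_⟩
        have : pvChr m = String.ofList [c] := by
          rw [pvChr, hm, Int.toNat_natCast, Char.ofNat_toNat]
        rw [this, ← hps]; simp
      · exact absurd hsome (by simp)
    · rintro ⟨p, hp, hbeq⟩
      have hkey : p.1 = pvChr m := by simpa using hbeq
      refine ⟨p, hp, ?_⟩
      rw [hkey, toList_pvChr,
        if_pos (show ([Char.ofNat m.toNat] : List Char).length = 1 from rfl),
        pvOrd_pvChr m h0 h126]
  · constructor
    · rintro ⟨p, hp, hsome⟩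
      split at hsome
      · have hord := pvOrd_le_of_dom p.1 (hK p hp)
        have := Option.some.inj hsome
        omega
      · exact absurd hsome (by simp)
    · rintro ⟨p, hp, hbeq⟩
      exfalso
      have htrue : pvHasKey cm (pvChr m) = true := by
        unfold pvHasKey; rw [List.any_eq_true]; exact ⟨p, hp, hbeq⟩
      rw [hasKey_pvChr_big cm hK m (by omega)] at htrue
      exact Bool.false_ne_true htrue

theorem firstGap_eq (codes : PySem.Set Int) (b c : Int)
    (hc0 : 0 ≤ c) (hc : c < 130)
    (hmemT : ∀ i : Int, 0 ≤ i → i < c → (b + i) ∈ codes)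
    (hmemF : (b + c) ∉ codes) :
    ∀ (k : Nat) (s : Int), (130 - s).toNat ≤ k → 0 ≤ s → s ≤ c →
      pvFirstGap codes b (PySem.List.pyRange s 130 1) = c := by
  intro k
  induction k with
  | zero => intro s hk h0 hsc; omega
  | succ n ih =>
      intro s hk h0 hsc
      rw [PySem.List.pyRange_one_cons (by omega : s < 130)]
      simp only [pvFirstGap]
      by_cases hmem : (b + s) ∈ codes
      · have hsne : s ≠ c := by rintro rfl; exact hmemF hmem
        rw [if_pos hmem]
        exact ih (s + 1) (by omega) (by omega) (by omega)
      · rw [if_neg hmem]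
        have hnlt : ¬ s < c := fun hlt => hmem (hmemT s h0 hlt)
        omega

theorem pvRun_eq_countB (cm : List (String × Int))
    (hK : ∀ p ∈ cm, pvDomStr p.1 = true) (base : Int) (hb : 65 ≤ base) (hb2 : base ≤ 88) :
    pvRun (pvCodes cm) base = countB cm base (cm.length + 131) 0 := by
  set c := countB cm base (cm.length + 131) 0 with hc
  have hge : (0 : Int) ≤ c := countB_ge cm base _ 0
  have hle : base + c ≤ 127 := countB_le127 cm hK base _ 0 (le_refl _) (by omega)
  have hrun := countB_run cm base (cm.length + 131)
  have hstopped := countB_stop cm hK base (cm.length + 131) 0 (le_refl _) (by push_cast; omega)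
  have h := firstGap_eq (pvCodes cm) base c hge (by omega)
    (fun i h0 hic => (mem_pvCodes cm hK (base + i) (by omega)).mpr (hrun 0 i h0 hic))
    (fun hmem => by
      have := (mem_pvCodes cm hK (base + c) (by omega)).mp hmem
      rw [hstopped] at this; exact absurd this (by simp))
    130 0 (by omega) (le_refl _) hge
  exact h

theorem flatMap_congr_mem {α β : Type} (l : List α) (f g : α → List β)
    (h : ∀ x ∈ l, f x = g x) : l.flatMap f = l.flatMap g := by
  induction l with
  | nil => rfl
  | cons a t ih =>
      simp only [List.flatMap_cons]
      rw [h a List.mem_cons_self, ih (fun x hx => h x (List.mem_cons_of_mem a hx))]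

theorem digit_ord_lt (m : Int) (h0 : 0 ≤ m) (h1 : m ≤ 9) :
    (PySem.Int.toStr m).toList.length = 1 ∧ pvOrd (PySem.Int.toStr m) < 88 := by
  interval_cases m <;> exact ⟨by decide, by decide⟩

theorem loop2A_eq_aux (seq2 : PySem.Set String) (arr1 : List String) :
    ∀ (n : Nat) (off2 : Int), (off2 + 1).toNat ≤ n →
      loop2A seq2 arr1 off2 =
        (PySem.List.pyRange off2 (-1) (-1)).map (fun o => applyA seq2 88 o arr1) := by
  intro n
  induction n with
  | zero =>
      intro off2 hn
      rw [loop2A, if_neg (by omega : ¬ (0:Int) ≤ off2),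
        PySem.List.pyRange_neg_one_eq_nil (by omega : off2 ≤ -1), List.map_nil]
  | succ m ih =>
      intro off2 hn
      by_cases h : (0 : Int) ≤ off2
      · rw [loop2A, if_pos h, PySem.List.pyRange_neg_one_cons (by omega : (-1:Int) < off2),
          List.map_cons, ih (off2 - 1) (by omega)]
      · rw [loop2A, if_neg h, PySem.List.pyRange_neg_one_eq_nil (by omega : off2 ≤ -1),
          List.map_nil]

theorem loop2A_eq (seq2 : PySem.Set String) (arr1 : List String) (off2 : Int) :
    loop2A seq2 arr1 off2 =
      (PySem.List.pyRange off2 (-1) (-1)).map (fun o => applyA seq2 88 o arr1) :=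
  loop2A_eq_aux seq2 arr1 (off2 + 1).toNat off2 (le_refl _)

theorem loop1A_eq_aux (cm : List (String × Int)) (arr : List String) (seq1 : PySem.Set String) :
    ∀ (n : Nat) (off1 : Int), (off1 + 1).toNat ≤ n →
      loop1A cm arr seq1 off1 =
        (PySem.List.pyRange off1 (-1) (-1)).flatMap (fun o =>
          if pvHasKey cm "X" then
            loop2A (seqLoopA cm 88 (cm.length + 131) 0 []).2 (applyA seq1 65 o arr)
              (10 - (seqLoopA cm 88 (cm.length + 131) 0 []).1)
          else [applyA seq1 65 o arr]) := by
  intro n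
  induction n with
  | zero =>
      intro off1 hn
      rw [loop1A, if_neg (by omega : ¬ (0:Int) ≤ off1),
        PySem.List.pyRange_neg_one_eq_nil (by omega : off1 ≤ -1), List.flatMap_nil]
  | succ m ih =>
      intro off1 hn
      by_cases h : (0 : Int) ≤ off1
      · rw [loop1A, if_pos h, PySem.List.pyRange_neg_one_cons (by omega : (-1:Int) < off1),
          List.flatMap_cons, ih (off1 - 1) (by omega)]
      · rw [loop1A, if_neg h, PySem.List.pyRange_neg_one_eq_nil (by omega : off1 ≤ -1),
          List.flatMap_nil]

theorem loop1A_eq (cm : List (String × Int)) (arr : List String) (seq1 : PySem.Set String)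
    (off1 : Int) :
    loop1A cm arr seq1 off1 =
      (PySem.List.pyRange off1 (-1) (-1)).flatMap (fun o =>
        if pvHasKey cm "X" then
          loop2A (seqLoopA cm 88 (cm.length + 131) 0 []).2 (applyA seq1 65 o arr)
            (10 - (seqLoopA cm 88 (cm.length + 131) 0 []).1)
        else [applyA seq1 65 o arr]) :=
  loop1A_eq_aux cm arr seq1 (off1 + 1).toNat off1 (le_refl _)

theorem ofList_len (c : Char) : (String.ofList [c]).toList.length = 1 := by
  simp [String.toList_ofList]

theorem pvEmit_cons (gi b cnt : Int) (rest : List (Int × Int)) (toks : List PvTok) :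
    pvEmit gi ((b, cnt) :: rest) toks =
      (PySem.List.pyRange (10 - cnt) (-1) (-1)).flatMap
        (fun off => pvEmit (gi + 1) rest (toks.map (pvSubst gi off))) := by
  simp only [pvEmit]
  rw [PySem.List.foldl_append_eq_flatMap]
  simp

theorem pvEmit_last (gi b cnt : Int) (toks : List PvTok) :
    pvEmit gi [(b, cnt)] toks =
      (PySem.List.pyRange (10 - cnt) (-1) (-1)).map
        (fun off => (toks.map (pvSubst gi off)).map pvTokStr) := by
  simp only [pvEmit]
  rw [PySem.List.foldl_append_singleton_eq_map]
  simp

theorem char_noX (seq1 : PySem.Set String) (ca : Int)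
    (hm1 : ∀ s : String, s ∈ seq1 ↔
      (s.toList.length = 1 ∧ 65 ≤ pvOrd s ∧ pvOrd s < 65 + ca))
    (oa : Int) (c : Char) :
    pvTokStr (pvSubst 0 oa (pvClassify 0 [(65, ca)] (String.ofList [c]))) =
      (if String.ofList [c] ∈ seq1 then
        PySem.Int.toStr (oa + pvOrd (String.ofList [c]) - 65) else String.ofList [c]) := by
  by_cases h : 65 ≤ pvOrd (String.ofList [c]) ∧ pvOrd (String.ofList [c]) < 65 + ca
  · have hin : String.ofList [c] ∈ seq1 := (hm1 _).mpr ⟨ofList_len c, h.1, h.2⟩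
    have harg : oa + (pvOrd (String.ofList [c]) - 65) = oa + pvOrd (String.ofList [c]) - 65 := by
      ring
    simp only [pvClassify]
    rw [if_pos (show (0:Int) ≤ pvOrd (String.ofList [c]) - 65 ∧
          pvOrd (String.ofList [c]) - 65 < ca from ⟨by omega, by omega⟩),
      if_pos hin]
    simp [pvSubst, pvTokStr, harg]
  · have hout : String.ofList [c] ∉ seq1 :=
      fun hs => h ⟨((hm1 _).mp hs).2.1, ((hm1 _).mp hs).2.2⟩
    simp only [pvClassify]
    rw [if_neg (show ¬((0:Int) ≤ pvOrd (String.ofList [c]) - 65 ∧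
          pvOrd (String.ofList [c]) - 65 < ca) by omega),
      if_neg hout]
    simp [pvSubst, pvTokStr]

theorem char_X (seq1 seq2 : PySem.Set String) (ca cx : Int)
    (hm1 : ∀ s : String, s ∈ seq1 ↔
      (s.toList.length = 1 ∧ 65 ≤ pvOrd s ∧ pvOrd s < 65 + ca))
    (hm2 : ∀ s : String, s ∈ seq2 ↔
      (s.toList.length = 1 ∧ 88 ≤ pvOrd s ∧ pvOrd s < 88 + cx))
    (oa ox : Int) (hoa : 0 ≤ oa) (hoa2 : oa ≤ 10 - ca) (c : Char) :
    pvTokStr (pvSubst 1 ox (pvSubst 0 oa (pvClassify 0 [(65, ca), (88, cx)] (String.ofList [c])))) =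
      (if (if String.ofList [c] ∈ seq1 then
            PySem.Int.toStr (oa + pvOrd (String.ofList [c]) - 65) else String.ofList [c]) ∈ seq2
       then PySem.Int.toStr (ox + pvOrd (if String.ofList [c] ∈ seq1 then
            PySem.Int.toStr (oa + pvOrd (String.ofList [c]) - 65) else String.ofList [c]) - 88)
       else (if String.ofList [c] ∈ seq1 then
            PySem.Int.toStr (oa + pvOrd (String.ofList [c]) - 65) else String.ofList [c])) := by
  by_cases hA : 65 ≤ pvOrd (String.ofList [c]) ∧ pvOrd (String.ofList [c]) < 65 + ca
  · -- A-group char: substituted at level 0; the resulting digit string escapes the X test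
    have hin1 : String.ofList [c] ∈ seq1 := (hm1 _).mpr ⟨ofList_len c, hA.1, hA.2⟩
    have harg : oa + (pvOrd (String.ofList [c]) - 65) = oa + pvOrd (String.ofList [c]) - 65 := by
      ring
    have hd := digit_ord_lt (oa + pvOrd (String.ofList [c]) - 65) (by omega) (by omega)
    have hout2 : PySem.Int.toStr (oa + pvOrd (String.ofList [c]) - 65) ∉ seq2 := fun hs => by
      have := ((hm2 _).mp hs).2.1
      omega
    simp only [pvClassify]
    rw [if_pos (show (0:Int) ≤ pvOrd (String.ofList [c]) - 65 ∧
          pvOrd (String.ofList [c]) - 65 < ca from ⟨by omega, by omega⟩),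
      if_pos hin1, if_neg hout2]
    simp [pvSubst, pvTokStr, harg]
  · by_cases hX : 88 ≤ pvOrd (String.ofList [c]) ∧ pvOrd (String.ofList [c]) < 88 + cx
    · -- X-group char: untouched at level 0, substituted at level 1
      have hout1 : String.ofList [c] ∉ seq1 :=
        fun hs => hA ⟨((hm1 _).mp hs).2.1, ((hm1 _).mp hs).2.2⟩
      have hin2 : String.ofList [c] ∈ seq2 := (hm2 _).mpr ⟨ofList_len c, hX.1, hX.2⟩
      have harg : ox + (pvOrd (String.ofList [c]) - 88) = ox + pvOrd (String.ofList [c]) - 88 := by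
        ring
      simp only [pvClassify]
      rw [if_neg (show ¬((0:Int) ≤ pvOrd (String.ofList [c]) - 65 ∧
            pvOrd (String.ofList [c]) - 65 < ca) by omega),
        if_pos (show (0:Int) ≤ pvOrd (String.ofList [c]) - 88 ∧
            pvOrd (String.ofList [c]) - 88 < cx from ⟨by omega, by omega⟩),
        if_neg hout1, if_pos hin2]
      simp [pvSubst, pvTokStr, harg]
    · -- literal char
      have hout1 : String.ofList [c] ∉ seq1 :=
        fun hs => hA ⟨((hm1 _).mp hs).2.1, ((hm1 _).mp hs).2.2⟩
      have hout2 : String.ofList [c] ∉ seq2 :=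
        fun hs => hX ⟨((hm2 _).mp hs).2.1, ((hm2 _).mp hs).2.2⟩
      simp only [pvClassify]
      rw [if_neg (show ¬((0:Int) ≤ pvOrd (String.ofList [c]) - 65 ∧
            pvOrd (String.ofList [c]) - 65 < ca) by omega),
        if_neg (show ¬((0:Int) ≤ pvOrd (String.ofList [c]) - 88 ∧
            pvOrd (String.ofList [c]) - 88 < cx) by omega),
        if_neg hout1, if_neg hout2]
      simp [pvSubst, pvTokStr]

-- ===== VERDICT (by name: the statement is the Claim_ definition above) =====
theorem sequence_gen_spec : Claim_equal_sequence_gen := by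
  intro cm pat hDom
  unfold Spec_sequence_gen
  have hK : ∀ p ∈ cm, pvDomStr p.1 = true := by
    rw [Dom_sequence_gen, Bool.and_eq_true, List.all_eq_true] at hDom
    intro p hp
    have h2 := hDom.1 p hp
    rw [Bool.and_eq_true] at h2
    exact h2.1
  have hfstA : (seqLoopA cm 65 (cm.length + 131) 0 []).1 = countB cm 65 (cm.length + 131) 0 :=
    seqLoopA_fst cm 65 (cm.length + 131) 0 []
  have hfstX : (seqLoopA cm 88 (cm.length + 131) 0 []).1 = countB cm 88 (cm.length + 131) 0 :=
    seqLoopA_fst cm 88 (cm.length + 131) 0 []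
  have hleA := countB_le127 cm hK 65 (cm.length + 131) 0 (by omega) (by omega)
  have hleX := countB_le127 cm hK 88 (cm.length + 131) 0 (by omega) (by omega)
  have hm1 := mem_seqLoop_char cm 65 (cm.length + 131) (by omega) hleA
  have hm2 := mem_seqLoop_char cm 88 (cm.length + 131) (by omega) hleX
  have hrunA : pvRun (pvCodes cm) 65 = countB cm 65 (cm.length + 131) 0 :=
    pvRun_eq_countB cm hK 65 (by omega) (by omega)
  have hrunX : pvRun (pvCodes cm) 88 = countB cm 88 (cm.length + 131) 0 :=
    pvRun_eq_countB cm hK 88 (by omega) (by omega)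
  have hX88 : ((88 : Int) ∈ pvCodes cm) ↔ pvHasKey cm "X" = true := by
    have := mem_pvCodes cm hK 88 (by omega)
    rwa [show pvChr 88 = "X" by decide] at this
  simp only [sequence_gen, sequence_gen_alt]
  rw [loop1A_eq, hrunA, hrunX, hfstA]
  by_cases hX : pvHasKey cm "X" = true
  · rw [if_pos (hX88.mpr hX), pvEmit_cons]
    simp only [hX, if_true, hfstX]
    apply flatMap_congr_mem
    intro oa hoa
    rw [PySem.List.mem_pyRange_neg_one] at hoa
    rw [loop2A_eq, pvEmit_last]
    apply List.map_congr_left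
    intro ox _
    simp only [applyA, List.map_map]
    apply List.map_congr_left
    intro c _
    simp only [Function.comp]
    exact (char_X _ _ _ _ hm1 hm2 oa ox (by omega) (by omega) c).symm
  · have hX' : pvHasKey cm "X" = false := by simpa using hX
    rw [if_neg (fun h => hX (hX88.mp h)), pvEmit_last]
    simp only [hX', Bool.false_eq_true, if_false]
    have : ∀ (l : List Int) (g : Int → List String),
        l.flatMap (fun o => [g o]) = l.map g := by
      intro l g; induction l with
      | nil => rfl
      | cons a t ih => simp [List.flatMap_cons, ih]
    rw [this]
    apply List.map_congr_left
    intro oa _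
    simp only [applyA, List.map_map]
    apply List.map_congr_left
    intro c _
    simp only [Function.comp]
    exact (char_noX _ _ hm1 oa c).symm
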